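-- pv_equiv track=rewrite | github.com/Recordum/Jungle_algorithm | krafton/02.py | solution
-- ===== SOURCE A (Python) =====
-- def solution(S):
--     stack = []
--     b_stack = []
--     for letter in S:
--         if letter == 'A':
--            while stack:
--                 if stack[-1] == "B":
--                    b_stack.append(stack.pop())
--                 else:
--                     break
--         stack.append(letter)
--     return len(b_stack)
-- ===== SOURCE B (Python) =====
-- def solution(S):
--     total = 0
--     run = 0
--     for c in S:
--         if c == 'B':
--             run += 1
--         elif c == 'A':
--             total += run
--             run = 0
--         else:
--             run = 0
--     return total
-- ===== Notes on version B (the rewrite author's own statement) =====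
-- stated objective: simpler
-- what changed: Replaced the two explicit stacks and the inner popping while-loop with a single forward pass keeping one integer 'run' (length of the current trailing B-run), adding it to a total at each 'A'.
import Mathlib
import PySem

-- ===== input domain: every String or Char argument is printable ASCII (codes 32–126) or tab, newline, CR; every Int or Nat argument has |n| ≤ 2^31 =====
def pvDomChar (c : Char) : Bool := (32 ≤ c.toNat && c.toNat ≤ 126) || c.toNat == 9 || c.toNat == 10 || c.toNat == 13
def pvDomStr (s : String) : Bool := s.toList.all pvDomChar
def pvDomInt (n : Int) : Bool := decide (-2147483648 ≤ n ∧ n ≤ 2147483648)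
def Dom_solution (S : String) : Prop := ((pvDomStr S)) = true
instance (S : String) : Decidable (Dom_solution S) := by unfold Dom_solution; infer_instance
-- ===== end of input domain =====

-- B replaces A's two stacks and inner popping while-loop by one pass with a single run counter (objective: simpler).

-- ===== PORT A =====
-- A's stack with top-of-stack as list head (Python's stack[-1]/append/pop at the end).
-- Inner 'while stack: if stack[-1] == "B": b_stack.append(stack.pop()) else: break'
def popWhileB : List Char → List Char → List Char × List Char
  | [], bstack => ([], bstack)
  | c :: rest, bstack => if c == 'B' then popWhileB rest (c :: bstack) else (c :: rest, bstack)

def solutionStep (st : List Char × List Char) (letter : Char) : List Char × List Char :=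
  if letter == 'A' then
    let st' := popWhileB st.1 st.2
    (letter :: st'.1, st'.2)
  else
    (letter :: st.1, st.2)

def solution (S : String) : Int :=
  let st := S.toList.foldl solutionStep ([], [])
  (st.2.length : Int)

-- ===== PORT B =====
def solutionAltStep (st : Int × Int) (c : Char) : Int × Int :=
  if c == 'B' then (st.1, st.2 + 1)
  else if c == 'A' then (st.1 + st.2, 0)
  else (st.1, 0)

def solution_alt (S : String) : Int :=
  (S.toList.foldl solutionAltStep (0, 0)).1

-- ===== PRECONDITION & SPEC =====
def Spec_solution (S : String) (out : Int) : Prop := out = solution_alt S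
instance (S : String) (out : Int) : Decidable (Spec_solution S out) := by unfold Spec_solution; infer_instance

-- ===== CLAIM (what is proved, stated in full; the proofs are below) =====
def Claim_equal_solution : Prop := ∀ (S : String), Dom_solution S → Spec_solution S (solution S)

-- ===== LEMMAS AND PROOFS =====

-- number of 'B's at the top of A's stack (head = top)
def leadB (l : List Char) : Nat := (l.takeWhile (· == 'B')).length

theorem popWhileB_eq (stack bstack : List Char) :
    popWhileB stack bstack =
      (stack.dropWhile (· == 'B'), (stack.takeWhile (· == 'B')).reverse ++ bstack) := by
  induction stack generalizing bstack with
  | nil => simp [popWhileB]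
  | cons c rest ih =>
    by_cases h : c = 'B'
    · simp [popWhileB, h, ih, List.takeWhile, List.dropWhile]
    · have hb : (c == 'B') = false := by simp [h]
      simp [popWhileB, hb, List.takeWhile, List.dropWhile]

theorem invariant (l : List Char) (stack bstack : List Char) :
    ((l.foldl solutionStep (stack, bstack)).2.length : Int)
      = (l.foldl solutionAltStep ((bstack.length : Int), (leadB stack : Int))).1 := by
  induction l generalizing stack bstack with
  | nil => simp [leadB]
  | cons c rest ih =>
    by_cases hB : c = 'B'
    · have hA : c ≠ 'A' := by simp [hB]
      simp only [List.foldl_cons, solutionStep, solutionAltStep, hB]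
      simp only [beq_self_eq_true, if_true, if_neg (by decide : ('B' : Char) ≠ 'A'), beq_iff_eq]
      rw [ih]
      have : leadB ('B' :: stack) = leadB stack + 1 := by simp [leadB, List.takeWhile]
      simp [this]
    · by_cases hA : c = 'A'
      · simp only [List.foldl_cons, solutionStep, solutionAltStep, hA]
        simp only [beq_self_eq_true, if_true, if_neg (by decide : ('A' : Char) ≠ 'B'), beq_iff_eq]
        rw [popWhileB_eq]
        rw [ih]
        have h1 : leadB ('A' :: (stack.dropWhile (· == 'B'))) = 0 := by
          simp [leadB, List.takeWhile]
        have h2 : ((stack.takeWhile (· == 'B')).reverse ++ bstack).length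
            = bstack.length + leadB stack := by
          simp [leadB]; omega
        simp [h1, h2]
      · simp only [List.foldl_cons, solutionStep, solutionAltStep,
          if_neg (by simp [hA] : ¬ (c == 'A') = true), if_neg (by simp [hB] : ¬ (c == 'B') = true)]
        rw [ih]
        have hb : (c == 'B') = false := by simp [hB]
        have : leadB (c :: stack) = 0 := by simp [leadB, List.takeWhile, hb]
        simp [this]

-- ===== VERDICT (by name: the statement is the Claim_ definition above) =====
theorem solution_spec : Claim_equal_solution := by
  intro S _
  unfold Spec_solution solution solution_alt
  have := invariant S.toList [] []
  simpa [leadB] using this
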